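-- pv_equiv track=rewrite | github.com/abrahamshimekt/Competitive-Programming-Problem-Solutions | diagonal_traverse/diagonal_traverse.py | above_diagonal
-- ===== SOURCE A (Python) =====
-- def above_diagonal(m,n,mat):
--
--     above_diagonal = []
--     for column in range(n):
--
--         row  = 0
--         left_column = column
--         diagonal = []
--
--         while row < m and left_column > -1:
--
--             diagonal.append(mat[row][left_column])
--             row +=1
--             left_column -=1
--
--         # starting column 0 all even indexed columns would be reversed their order
--         # since I have a fixed starting point to traverse elements starting from
--         #  right to bottom left
--
--         if column %2 ==0:
--             diagonal = diagonal[::-1]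
--         above_diagonal += diagonal
--
--     return above_diagonal
-- ===== SOURCE B (Python) =====
-- def above_diagonal(m, n, mat):
--     # bucket-by-anti-diagonal: scan the relevant rows once into n buckets, then
--     # concatenate the buckets in order, reversing every second one (starting even).
--     # Rows >= n can never satisfy i + j < n, so only rows < min(m, n) are scanned.
--     buckets = [[] for _ in range(n)]
--     for i in range(min(m, n)):
--         for j in range(n):
--             if i + j < n:
--                 buckets[i + j].append(mat[i][j])
--     out, rev = [], True
--     for bucket in buckets:
--         out += bucket[::-1] if rev else bucket
--         rev = not rev
--     return out
-- ===== Notes on version B (the rewrite author's own statement) =====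
-- stated objective: alternative
-- what changed: A walks each anti-diagonal with a two-pointer (row++, column--) inner while-loop per starting column; B does one full row-major scan of the grid appending each mat[i][j] with i+j < n into a bucket list indexed by the anti-diagonal sum i+j, then concatenates the buckets, reversing the even-indexed ones.
import Mathlib
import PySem

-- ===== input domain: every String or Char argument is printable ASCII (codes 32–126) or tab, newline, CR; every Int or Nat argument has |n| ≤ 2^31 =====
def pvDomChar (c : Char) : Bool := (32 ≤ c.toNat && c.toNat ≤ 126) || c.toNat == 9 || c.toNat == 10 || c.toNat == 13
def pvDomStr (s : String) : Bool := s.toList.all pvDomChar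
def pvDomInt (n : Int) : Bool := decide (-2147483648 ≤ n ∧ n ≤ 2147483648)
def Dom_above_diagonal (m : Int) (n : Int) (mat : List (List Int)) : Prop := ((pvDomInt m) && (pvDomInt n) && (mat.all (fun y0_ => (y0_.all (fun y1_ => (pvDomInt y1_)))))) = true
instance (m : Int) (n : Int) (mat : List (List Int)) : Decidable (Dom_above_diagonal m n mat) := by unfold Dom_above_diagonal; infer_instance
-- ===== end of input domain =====

-- B replaces A's per-column two-pointer diagonal walk by one full (i,j) scan into per-anti-diagonal
-- buckets concatenated afterwards (alternative decomposition, same asymptotic cost); return values proved equal.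


-- ===== PORT A =====
-- the 'while row < m and left_column > -1' walk; mat[row][left_column] via pyGet?
-- (the .getD defaults are never reached on inputs admitted by Pre_above_diagonal)
def pvDiagLoopA (m : Int) (mat : List (List Int)) (row lc : Int) (diag : List Int) : List Int :=
  if _h : row < m ∧ -1 < lc then
    pvDiagLoopA m mat (row + 1) (lc - 1)
      (diag ++ [(PySem.List.pyGet? ((PySem.List.pyGet? mat row).getD []) lc).getD 0])
  else diag
termination_by (lc + 1).toNat
decreasing_by omega

def above_diagonal (m : Int) (n : Int) (mat : List (List Int)) : List Int :=
  (PySem.List.pyRange 0 n 1).foldl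
    (fun acc column =>
      let diagonal := pvDiagLoopA m mat 0 column []
      acc ++ (if PySem.Int.mod column 2 = 0 then diagonal.reverse else diagonal)) []

-- ===== PORT B =====
-- mat[i][j] via pyGet? (defaults never reached under Pre_above_diagonal);
-- buckets[i+j] is a plain in-range list index (0 ≤ i+j < n = len(buckets)), hence .toNat is exact
def pvEntryB (mat : List (List Int)) (i j : Int) : Int :=
  (PySem.List.pyGet? ((PySem.List.pyGet? mat i).getD []) j).getD 0

def pvRowScanB (n : Int) (mat : List (List Int)) (i : Int) (bs : List (List Int)) : List (List Int) :=
  (PySem.List.pyRange 0 n 1).foldl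
    (fun bs j => if i + j < n then bs.modify (i + j).toNat (fun b => b ++ [pvEntryB mat i j]) else bs)
    bs

def above_diagonal_alt (m : Int) (n : Int) (mat : List (List Int)) : List Int :=
  let bs0 : List (List Int) := (PySem.List.pyRange 0 n 1).map (fun _ => ([] : List Int))
  -- rows ≥ n never satisfy i + j < n, so only rows < min(m, n) are scanned
  let bs := (PySem.List.pyRange 0 (min m n) 1).foldl (fun bs i => pvRowScanB n mat i bs) bs0
  -- 'out, rev = [], True; for bucket in buckets: out += bucket[::-1] if rev else bucket; rev = not rev'
  (bs.foldl (fun p bucket => (p.1 ++ (if p.2 then bucket.reverse else bucket), !p.2))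
    (([] : List Int), true)).1
-- ===== PRECONDITION & SPEC =====
-- Pre_ excludes exactly the inputs on which Python A raises IndexError: some accessed row r
-- (0 ≤ r < min m n) is missing or shorter than n - r (row r is read at columns up to n-1-r).
def Pre_above_diagonal (m : Int) (n : Int) (mat : List (List Int)) : Prop :=
  (min m n).toNat ≤ mat.length ∧ ∀ r < (min m n).toNat, n ≤ ((mat.getD r []).length : Int) + r
instance (m : Int) (n : Int) (mat : List (List Int)) : Decidable (Pre_above_diagonal m n mat) := by
  unfold Pre_above_diagonal; infer_instance

def pvWitness_above_diagonal : Int × Int × List (List Int) := (2, 3, [[1, 2, 3], [4, 5, 6]])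

def Spec_above_diagonal (m : Int) (n : Int) (mat : List (List Int)) (out : List Int) : Prop := out = above_diagonal_alt m n mat
instance (m : Int) (n : Int) (mat : List (List Int)) (out : List Int) : Decidable (Spec_above_diagonal m n mat out) := by unfold Spec_above_diagonal; infer_instance

-- ===== CLAIM (what is proved, stated in full; the proofs are below) =====
def Claim_equal_above_diagonal : Prop := ∀ (m : Int) (n : Int) (mat : List (List Int)), Dom_above_diagonal m n mat → Pre_above_diagonal m n mat → Spec_above_diagonal m n mat (above_diagonal m n mat)

-- ===== LEMMAS AND PROOFS =====
-- both ports are shown equal (unconditionally) to the canonical anti-diagonal decomposition pvCanon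
def pvElem (mat : List (List Int)) (r c : Nat) : Int := (mat.getD r []).getD c 0

def pvDiag (mat : List (List Int)) (k s : Nat) : List Int :=
  (List.range k).map fun r => pvElem mat r (s - r)

def pvCanon (m : Int) (n : Int) (mat : List (List Int)) : List Int :=
  ((List.range n.toNat).map fun s =>
    let d := pvDiag mat (min m.toNat (s + 1)) s
    if s % 2 = 0 then d.reverse else d).flatten

lemma pvGetCast (mat : List (List Int)) (r c : Int) (hr : 0 ≤ r) (hc : 0 ≤ c) :
    (PySem.List.pyGet? ((PySem.List.pyGet? mat r).getD []) c).getD 0 = pvElem mat r.toNat c.toNat := by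
  rw [PySem.List.pyGet?_of_nonneg mat hr]
  rw [PySem.List.pyGet?_of_nonneg _ hc]
  simp [pvElem, List.getD_eq_getElem?_getD]

lemma pvDiagLoopA_eq (m : Int) (mat : List (List Int)) :
    ∀ (lc row : Nat) (acc : List Int),
      pvDiagLoopA m mat (row : Int) (lc : Int) acc
        = acc ++ (List.range (min (m.toNat - row) (lc + 1))).map
            (fun t => pvElem mat (row + t) (lc - t)) := by
  intro lc
  induction lc with
  | zero =>
    intro row acc
    rw [pvDiagLoopA]
    by_cases hr : (row : Int) < m
    · rw [dif_pos ⟨hr, by omega⟩]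
      have h0 : ((0 : Nat) : Int) - 1 = -1 := by norm_num
      rw [h0, pvDiagLoopA, dif_neg (by norm_num)]
      have hmin : min (m.toNat - row) 1 = 1 := by omega
      rw [hmin, pvGetCast mat _ _ (by omega) (by omega)]
      simp
    · rw [dif_neg (by tauto)]
      have hmin : min (m.toNat - row) 1 = 0 := by omega
      rw [hmin]; simp
  | succ lc ih =>
    intro row acc
    rw [pvDiagLoopA]
    by_cases hr : (row : Int) < m
    · rw [dif_pos ⟨hr, by omega⟩]
      have h1 : ((row : Int) + 1) = ((row + 1 : Nat) : Int) := by push_cast; ring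
      have h2 : (((lc + 1 : Nat)) : Int) - 1 = (lc : Int) := by push_cast; ring
      rw [h1, h2, ih (row + 1), pvGetCast mat _ _ (by omega) (by omega),
        List.append_assoc]
      have hmin : min (m.toNat - row) (lc + 1 + 1) = min (m.toNat - (row + 1)) (lc + 1) + 1 := by
        omega
      rw [hmin, List.range_succ_eq_map]
      simp only [List.map_cons, List.map_map, List.singleton_append]
      have tail_eq :
          List.map (fun t => pvElem mat (row + 1 + t) (lc - t))
              (List.range (min (m.toNat - (row + 1)) (lc + 1)))
            = List.map ((fun t => pvElem mat (row + t) (lc + 1 - t)) ∘ Nat.succ)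
              (List.range (min (m.toNat - (row + 1)) (lc + 1))) := by
        apply List.map_congr_left
        intro t _
        simp only [Function.comp_apply]
        have e1 : row + Nat.succ t = row + 1 + t := by omega
        have e2 : lc + 1 - Nat.succ t = lc - t := by omega
        rw [e1, e2]
      rw [tail_eq]
      simp
    · rw [dif_neg (by tauto)]
      have hmin : min (m.toNat - row) (lc + 1 + 1) = 0 := by omega
      rw [hmin]; simp

lemma pvModCast (s : Nat) : PySem.Int.mod (s : Int) 2 = ((s % 2 : Nat) : Int) := by
  exact_mod_cast PySem.Int.mod_natCast s 2

lemma above_diagonal_eq_canon (m n : Int) (mat : List (List Int)) :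
    above_diagonal m n mat = pvCanon m n mat := by
  unfold above_diagonal pvCanon
  rw [PySem.List.foldl_append_eq_flatMap, PySem.List.pyRange_one, List.flatMap_map,
    List.flatMap_def, List.nil_append]
  simp only [sub_zero]
  congr 1
  apply List.map_congr_left
  intro s _
  have hz : ((0 : Int) + (s : Int)) = ((s : Nat) : Int) := by ring
  rw [hz]
  have hd := pvDiagLoopA_eq m mat s 0 []
  simp only [Nat.cast_zero, List.nil_append, Nat.sub_zero, zero_add] at hd
  rw [hd, pvModCast]
  simp only [pvDiag]
  by_cases hp : s % 2 = 0
  · have h2 : (2 : Int) ∣ (s : Int) := by omega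
    simp [hp]
  · have h2 : ¬ (2 : Int) ∣ (s : Int) := by omega
    simp [hp, h2]

lemma pvEntryB_natCast (mat : List (List Int)) (r c : Nat) :
    pvEntryB mat (r : Int) (c : Int) = pvElem mat r c := by
  rw [pvEntryB, pvGetCast mat _ _ (by omega) (by omega)]
  simp

lemma pvFoldModify (g : Int → Nat) (p : Int → Prop) [DecidablePred p] (v : Int → Int) :
    ∀ (js : List Int) (bs : List (List Int)) (s : Nat),
      (js.foldl (fun bs j => if p j then bs.modify (g j) (fun b => b ++ [v j]) else bs) bs)[s]?
        = bs[s]?.map (fun b => b ++ (js.filter (fun j => decide (p j) && (g j == s))).map v) := by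
  intro js
  induction js with
  | nil => intro bs s; cases h : bs[s]? <;> simp [h]
  | cons j js ih =>
    intro bs s
    simp only [List.foldl_cons, List.filter_cons]
    by_cases hp : p j
    · rw [if_pos hp, ih]
      by_cases hg : g j = s
      · simp only [hp, hg, decide_true, beq_self_eq_true, Bool.and_self]
        rw [List.getElem?_modify]
        cases bs[s]? <;> simp
      · have : (decide (p j) && (g j == s)) = false := by simp [hg]
        rw [this]
        rw [List.getElem?_modify]
        cases bs[s]? <;> simp [hg]
    · rw [if_neg hp, ih]
      have h : (decide (p j) && (g j == s)) = false := by simp [hp]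
      simp [h]

lemma pvFilterRange (N a s : Nat) :
    (List.range N).filter (fun k => decide (a + k = s)) = if a ≤ s ∧ s - a < N then [s - a] else [] := by
  induction N with
  | zero => simp
  | succ N ih =>
    rw [List.range_succ, List.filter_append, ih]
    by_cases h1 : a + N = s
    · have hs : s - a = N := by omega
      have : ¬ (a ≤ s ∧ s - a < N) := by omega
      rw [if_neg this, if_pos (by omega : a ≤ s ∧ s - a < N + 1)]
      simp [h1, hs]
    · have : (a ≤ s ∧ s - a < N + 1) ↔ (a ≤ s ∧ s - a < N) := by omega
      simp only [List.filter_singleton, h1, decide_false]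
      rw [if_congr this rfl rfl]
      simp

lemma pvFlattenIf (M s : Nat) (e : Nat → Int) :
    ((List.range M).map fun a => if a ≤ s then [e a] else []).flatten
      = (List.range (min M (s + 1))).map e := by
  induction M with
  | zero => simp
  | succ M ih =>
    rw [List.range_succ, List.map_append, List.flatten_append, ih]
    by_cases hM : M ≤ s
    · have : min (M + 1) (s + 1) = min M (s + 1) + 1 := by omega
      rw [this, List.range_succ, List.map_append]
      simp [hM, min_eq_left (show M ≤ s + 1 by omega)]
    · have : min (M + 1) (s + 1) = min M (s + 1) := by omega
      rw [this]
      simp [hM]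

lemma pvRowScanB_getElem? (n : Int) (mat : List (List Int)) (a : Nat) (bs : List (List Int))
    (s : Nat) (hs : (s : Int) < n) :
    (pvRowScanB n mat (a : Int) bs)[s]?
      = bs[s]?.map (fun b => b ++ (if a ≤ s then [pvElem mat a (s - a)] else [])) := by
  unfold pvRowScanB
  rw [pvFoldModify (fun j => ((a : Int) + j).toNat) (fun j => (a : Int) + j < n)
    (fun j => pvEntryB mat (a : Int) j)]
  congr 1
  funext b
  congr 1
  rw [PySem.List.pyRange_one, List.filter_map, sub_zero]
  have hcong : ∀ k ∈ List.range n.toNat,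
      ((fun j => decide ((a : Int) + j < n) && (((a : Int) + j).toNat == s)) ∘ (fun k : Nat => (0 : Int) + k)) k
        = (fun k => decide (a + k = s)) k := by
    intro k hk
    have hk' : k < n.toNat := List.mem_range.mp hk
    by_cases h : a + k = s
    · simp only [Function.comp_apply, h]
      have e1 : ((a : Int) + ((0 : Int) + (k : Int))) = ((a + k : Nat) : Int) := by push_cast; ring
      rw [e1, h]
      simp
      omega
    · simp only [Function.comp_apply]
      have e1 : ((a : Int) + ((0 : Int) + (k : Int))) = ((a + k : Nat) : Int) := by push_cast; ring
      rw [e1]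
      simp [h]
      intro _
      omega
  rw [List.filter_congr hcong, pvFilterRange]
  by_cases ha : a ≤ s
  · have hlt : s - a < n.toNat := by omega
    rw [if_pos ⟨ha, hlt⟩, if_pos ha]
    simp only [List.map_cons, List.map_nil]
    have e2 : ((0 : Int) + ((s - a : Nat) : Int)) = ((s - a : Nat) : Int) := by ring
    rw [e2, pvEntryB_natCast]
  · rw [if_neg (by omega), if_neg ha]
    simp

lemma pvOuterFold (n : Int) (mat : List (List Int)) :
    ∀ (js : List Int) (bs : List (List Int)) (s : Nat), (s : Int) < n → (∀ j ∈ js, 0 ≤ j) →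
      (js.foldl (fun bs i => pvRowScanB n mat i bs) bs)[s]?
        = bs[s]?.map (fun b =>
            b ++ ((js.map fun j =>
              if j ≤ (s : Int) then [pvElem mat j.toNat (s - j.toNat)] else []).flatten)) := by
  intro js
  induction js with
  | nil => intro bs s _ _; cases h : bs[s]? <;> simp [h]
  | cons j js ih =>
    intro bs s hs hnn
    simp only [List.map_cons, List.foldl_cons]
    rw [ih _ s hs (fun x hx => hnn x (List.mem_cons_of_mem _ hx))]
    have hj : (0 : Int) ≤ j := hnn j List.mem_cons_self
    have hjc : ((j.toNat : Nat) : Int) = j := by omega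
    have hrs := pvRowScanB_getElem? n mat j.toNat bs s hs
    rw [hjc] at hrs
    have hcond : (j.toNat ≤ s) = (j ≤ (s : Int)) := by
      apply propext; omega
    simp only [hcond] at hrs
    rw [hrs]
    cases h : bs[s]? <;> simp

lemma pvRowScanB_length (n : Int) (mat : List (List Int)) (i : Int) (bs : List (List Int)) :
    (pvRowScanB n mat i bs).length = bs.length := by
  unfold pvRowScanB
  generalize PySem.List.pyRange 0 n 1 = js
  induction js generalizing bs with
  | nil => rfl
  | cons j js ih =>
    simp only [List.foldl_cons]
    rw [ih]
    split <;> simp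

lemma pvFoldRows_length (n : Int) (mat : List (List Int)) (js : List Int) (bs : List (List Int)) :
    (js.foldl (fun bs i => pvRowScanB n mat i bs) bs).length = bs.length := by
  induction js generalizing bs with
  | nil => rfl
  | cons j js ih => simp only [List.foldl_cons]; rw [ih, pvRowScanB_length]

lemma pvBuckets_eq (m n : Int) (mat : List (List Int)) :
    (PySem.List.pyRange 0 (min m n) 1).foldl (fun bs i => pvRowScanB n mat i bs)
        ((PySem.List.pyRange 0 n 1).map (fun _ => ([] : List Int)))
      = (List.range n.toNat).map (fun s => pvDiag mat (min m.toNat (s + 1)) s) := by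
  apply List.ext_getElem?
  intro s
  by_cases hsN : s < n.toNat
  · have hs : (s : Int) < n := by omega
    rw [pvOuterFold n mat _ _ s hs
      (fun j hj => ((PySem.List.mem_pyRange_one).mp hj).1)]
    have h0 : ((PySem.List.pyRange 0 n 1).map (fun _ => ([] : List Int)))[s]? = some [] := by
      rw [List.getElem?_map]
      rw [List.getElem?_eq_getElem (by rw [PySem.List.length_pyRange_one]; omega)]
      simp
    rw [h0, PySem.List.pyRange_one, List.map_map, sub_zero]
    have hmap : (List.range (min m n).toNat).map
          ((fun j => if j ≤ (s : Int) then [pvElem mat j.toNat (s - j.toNat)] else [])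
            ∘ fun k : Nat => (0 : Int) + k)
        = (List.range (min m n).toNat).map (fun a => if a ≤ s then [pvElem mat a (s - a)] else []) := by
      apply List.map_congr_left
      intro a _
      simp only [Function.comp_apply, zero_add]
      by_cases ha : a ≤ s
      · rw [if_pos (by omega : (a : Int) ≤ (s : Int)), if_pos ha]
        simp
      · rw [if_neg (by omega), if_neg ha]
    rw [hmap, pvFlattenIf]
    have hminmn : min ((min m n).toNat) (s + 1) = min m.toNat (s + 1) := by omega
    rw [hminmn]
    rw [List.getElem?_map, List.getElem?_eq_getElem (by simpa using hsN)]
    simp [pvDiag]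
  · rw [List.getElem?_eq_none, List.getElem?_eq_none]
    · simp; omega
    · rw [pvFoldRows_length]
      simp only [List.length_map, PySem.List.length_pyRange_one]
      omega

lemma pvParityFold (f : Nat → List Int) :
    ∀ (N k : Nat) (out : List Int),
      (((List.range' k N).map f).foldl
          (fun p bucket => (p.1 ++ (if p.2 then bucket.reverse else bucket), !p.2))
          (out, decide (k % 2 = 0)))
        = (out ++ ((List.range' k N).map
            (fun s => if s % 2 = 0 then (f s).reverse else f s)).flatten,
           decide ((k + N) % 2 = 0)) := by
  intro N
  induction N with
  | zero => intro k out; simp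
  | succ N ih =>
    intro k out
    rw [List.range'_succ]
    simp only [List.map_cons, List.foldl_cons]
    have hnot : (!decide (k % 2 = 0)) = decide ((k + 1) % 2 = 0) := by
      by_cases h : k % 2 = 0
      · have : ¬ (k + 1) % 2 = 0 := by omega
        simp [h, this]
      · have : (k + 1) % 2 = 0 := by omega
        simp [h, this]
    rw [hnot, ih (k + 1)]
    have hk : (k + 1 + N) = (k + (N + 1)) := by omega
    rw [hk]
    by_cases h : k % 2 = 0 <;> simp [h, List.append_assoc]

lemma above_diagonal_alt_eq_canon (m n : Int) (mat : List (List Int)) :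
    above_diagonal_alt m n mat = pvCanon m n mat := by
  unfold above_diagonal_alt
  dsimp only
  rw [pvBuckets_eq]
  have hp := pvParityFold (fun s => pvDiag mat (min m.toNat (s + 1)) s) n.toNat 0 []
  simp only [Nat.zero_mod, decide_true, List.nil_append, Nat.zero_add] at hp
  rw [List.range_eq_range', hp]
  unfold pvCanon
  rw [List.range_eq_range']

-- ===== VERDICT (by name: the statement is the Claim_ definition above) =====
theorem above_diagonal_spec : Claim_equal_above_diagonal := by
  intro m n mat _ _
  unfold Spec_above_diagonal
  rw [above_diagonal_eq_canon, above_diagonal_alt_eq_canon]
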